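-- pv_equiv track=rewrite | github.com/apprenticelearner/AL_Core | apprentice/agents/cre_agents/learning_mechs/how/nlp/parser.py | join_policy
-- ===== SOURCE A (Python) =====
-- def join_policy(policy, other_policy):
--   if(len(policy) == 0): return [*other_policy]
--
--   # Deep copy the policy
--   policy = [[*dp] for dp in policy]
--   if(len(policy) < len(other_policy)):
--     for i in range(len(other_policy)-len(policy)):
--       policy.append([])
--
--   for i, arr in enumerate(other_policy):
--     policy[i] = [*policy[i],*arr]
--   return policy
-- ===== SOURCE B (Python) =====
-- def join_policy(policy, other_policy):
--     # Structural recursion on both lists at once: concatenate heads, recurse on tails.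
--     if not policy:
--         return list(other_policy)
--     if not other_policy:
--         return list(policy)
--     return [policy[0] + other_policy[0]] + join_policy(policy[1:], other_policy[1:])
-- ===== Notes on version B (the rewrite author's own statement) =====
-- stated objective: simpler
-- what changed: Replaces A's deep-copy comprehension, padding loop and index-mutation loop with a single structural recursion that zips the two lists and concatenates corresponding sublists.
import Mathlib
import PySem

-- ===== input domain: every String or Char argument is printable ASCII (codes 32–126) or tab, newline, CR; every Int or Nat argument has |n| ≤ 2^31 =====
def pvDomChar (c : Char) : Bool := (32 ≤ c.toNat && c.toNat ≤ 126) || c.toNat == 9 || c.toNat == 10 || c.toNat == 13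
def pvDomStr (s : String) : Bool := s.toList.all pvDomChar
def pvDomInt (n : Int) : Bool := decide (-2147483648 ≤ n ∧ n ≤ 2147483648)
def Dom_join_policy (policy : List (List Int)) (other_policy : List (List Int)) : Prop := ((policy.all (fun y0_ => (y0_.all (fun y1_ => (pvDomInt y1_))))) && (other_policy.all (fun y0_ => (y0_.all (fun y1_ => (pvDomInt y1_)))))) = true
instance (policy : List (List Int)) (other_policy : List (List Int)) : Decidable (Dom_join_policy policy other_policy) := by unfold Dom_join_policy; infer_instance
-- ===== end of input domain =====

-- B replaces A's deep-copy, padding loop and index-mutation loop with one structural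
-- recursion zipping the two lists (return-value equivalence; neither mutates its arguments).


-- ===== PORT A =====
def join_policy (policy : List (List Int)) (other_policy : List (List Int)) : List (List Int) :=
  if policy.length = 0 then other_policy
  else
    -- policy = [[*dp] for dp in policy]
    let p1 := policy.map (fun dp => dp)
    -- padding loop: for i in range(len(other_policy)-len(policy)): policy.append([])
    let p2 := if p1.length < other_policy.length then
        (PySem.List.pyRange 0 ((other_policy.length : Int) - (p1.length : Int)) 1).foldl
          (fun acc _ => acc ++ [([] : List Int)]) p1
      else p1
    -- for i, arr in enumerate(other_policy): policy[i] = [*policy[i], *arr]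
    -- the reads/writes policy[i] are always in range here, so pyGetD/pySetD are exact
    (PySem.List.enumerate other_policy 0).foldl
      (fun acc ia => PySem.List.pySetD acc ia.1 (PySem.List.pyGetD acc ia.1 [] ++ ia.2)) p2

-- ===== PORT B =====
def join_policy_alt : List (List Int) → List (List Int) → List (List Int)
  | [], ys => ys
  | x :: xs, [] => x :: xs
  | x :: xs, y :: ys => (x ++ y) :: join_policy_alt xs ys

-- ===== PRECONDITION & SPEC =====
def Spec_join_policy (policy : List (List Int)) (other_policy : List (List Int)) (out : List (List Int)) : Prop := out = join_policy_alt policy other_policy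
instance (policy : List (List Int)) (other_policy : List (List Int)) (out : List (List Int)) : Decidable (Spec_join_policy policy other_policy out) := by unfold Spec_join_policy; infer_instance

-- ===== CLAIM (what is proved, stated in full; the proofs are below) =====
def Claim_equal_join_policy : Prop := ∀ (policy : List (List Int)) (other_policy : List (List Int)), Dom_join_policy policy other_policy → Spec_join_policy policy other_policy (join_policy policy other_policy)

-- ===== LEMMAS AND PROOFS =====

-- the common closed form both programs compute
def jpSpec (xs ys : List (List Int)) : List (List Int) :=
  (List.zipWith (· ++ ·) (xs ++ List.replicate (ys.length - xs.length) []) ys) ++ xs.drop ys.length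

theorem zipWith_append_replicate (ys : List (List Int)) :
    List.zipWith (· ++ ·) (List.replicate ys.length ([] : List Int)) ys = ys := by
  induction ys with
  | nil => rfl
  | cons y ys ih => simp [List.replicate_succ, ih]

theorem alt_eq_jpSpec (xs : List (List Int)) : ∀ ys, join_policy_alt xs ys = jpSpec xs ys := by
  induction xs with
  | nil =>
    intro ys
    simp [join_policy_alt, jpSpec, zipWith_append_replicate]
  | cons x xs ih =>
    intro ys
    cases ys with
    | nil => simp [join_policy_alt, jpSpec]
    | cons y ys =>
      simp [join_policy_alt, jpSpec, ih ys]

theorem pad_foldl (l : List Int) (p : List (List Int)) :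
    l.foldl (fun acc _ => acc ++ [([] : List Int)]) p = p ++ List.replicate l.length [] := by
  induction l generalizing p with
  | nil => simp
  | cons a l ih => simp [List.foldl, ih, List.append_assoc, List.replicate_succ]

theorem set_fold (ys : List (List Int)) : ∀ (q r : List (List Int)), ys.length ≤ r.length →
    (PySem.List.enumerate ys (q.length : Int)).foldl
      (fun acc ia => PySem.List.pySetD acc ia.1 (PySem.List.pyGetD acc ia.1 [] ++ ia.2)) (q ++ r)
    = q ++ List.zipWith (· ++ ·) r ys ++ r.drop ys.length := by
  induction ys with
  | nil => intro q r _; simp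
  | cons y ys ih =>
    intro q r hlen
    cases r with
    | nil => simp at hlen
    | cons b r' =>
      rw [PySem.List.enumerate_cons]
      simp only [List.foldl_cons]
      have hget : PySem.List.pyGetD (q ++ b :: r') ((q.length : Nat) : Int) [] = b := by
        rw [PySem.List.pyGetD_natCast]
        simp
      have hset : PySem.List.pySetD (q ++ b :: r') ((q.length : Nat) : Int) (b ++ y)
          = q ++ (b ++ y) :: r' := by
        rw [PySem.List.pySetD_natCast]
        simp
      rw [hget, hset]
      have hc : ((q.length : Int) + 1) = (((q ++ [b ++ y]).length : Nat) : Int) := by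
        simp
      have happ : q ++ (b ++ y) :: r' = (q ++ [b ++ y]) ++ r' := by simp
      rw [hc, happ, ih (q ++ [b ++ y]) r' (by simp at hlen ⊢; omega)]
      simp [List.append_assoc]

theorem a_eq_jpSpec (xs ys : List (List Int)) (hne : xs ≠ []) :
    join_policy xs ys = jpSpec xs ys := by
  unfold join_policy
  rw [if_neg (by simpa using hne)]
  simp only [List.map_id_fun', id]
  by_cases h : xs.length < ys.length
  · rw [if_pos h, pad_foldl, PySem.List.length_pyRange_one]
    have hk : ((ys.length : Int) - (xs.length : Int) - 0).toNat = ys.length - xs.length := by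
      omega
    rw [hk]
    have h0 : (0 : Int) = (([] : List (List Int)).length : Int) := rfl
    have hbody : xs ++ List.replicate (ys.length - xs.length) []
        = [] ++ (xs ++ List.replicate (ys.length - xs.length) []) := rfl
    rw [h0, hbody, set_fold ys [] _ (by simp; omega)]
    unfold jpSpec
    have hd : (xs ++ List.replicate (ys.length - xs.length) []).drop ys.length = [] := by
      apply List.drop_eq_nil_of_le; simp; omega
    have hd2 : xs.drop ys.length = [] := List.drop_eq_nil_of_le (by omega)
    simp [hd, hd2]
  · rw [if_neg h]
    have h0 : (0 : Int) = (([] : List (List Int)).length : Int) := rfl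
    have hbody : xs = [] ++ xs := rfl
    rw [h0, hbody, set_fold ys [] xs (by omega)]
    unfold jpSpec
    have hk : ys.length - xs.length = 0 := by omega
    simp [hk]

-- ===== VERDICT (by name: the statement is the Claim_ definition above) =====
theorem join_policy_spec : Claim_equal_join_policy := by
  intro policy other_policy _
  unfold Spec_join_policy
  cases hp : policy with
  | nil => simp [join_policy, join_policy_alt]
  | cons x xs =>
    rw [a_eq_jpSpec _ _ (by simp), alt_eq_jpSpec]
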